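-- pv_equiv track=rewrite | github.com/pycraft-dev/USBBackupApp_v0.1.0 | source/src/services/autolaunch_service.py | _extract_target_serial_from_args
-- ===== SOURCE A (Python) =====
-- def _extract_target_serial_from_args(args_text: str) -> str:
--     """Извлекает значение после `--wmi-target-serial` из строки аргументов."""
--     try:
--         raw = str(args_text or "").strip()
--         if not raw:
--             return ""
--         parts = raw.replace("\r", " ").replace("\n", " ").split()
--         for i, p in enumerate(parts):
--             if p.strip().lower() == "--wmi-target-serial" and i + 1 < len(parts):
--                 return str(parts[i + 1]).strip().strip("\"'").upper()
--         return ""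
--     except Exception:
--         return ""
-- ===== SOURCE B (Python) =====
-- import re
--
-- _SERIAL_RE = re.compile(r'(?i)(?:^|\s)--wmi-target-serial\s+(\S+)')
--
--
-- def _extract_target_serial_from_args(args_text: str) -> str:
--     m = _SERIAL_RE.search(str(args_text or ""))
--     return m.group(1).strip("\"'").upper() if m else ""
-- ===== Notes on version B (the rewrite author's own statement) =====
-- stated objective: idiomatic
-- what changed: Replaces A's tokenize-then-scan (strip/replace preprocessing, split(), enumerate loop with an index-based parts[i+1] lookup) by a single compiled regex search r'(?i)(?:^|\s)--wmi-target-serial\s+(\S+)' that pattern-matches the flag and its value directly in the string.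
import Mathlib
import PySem

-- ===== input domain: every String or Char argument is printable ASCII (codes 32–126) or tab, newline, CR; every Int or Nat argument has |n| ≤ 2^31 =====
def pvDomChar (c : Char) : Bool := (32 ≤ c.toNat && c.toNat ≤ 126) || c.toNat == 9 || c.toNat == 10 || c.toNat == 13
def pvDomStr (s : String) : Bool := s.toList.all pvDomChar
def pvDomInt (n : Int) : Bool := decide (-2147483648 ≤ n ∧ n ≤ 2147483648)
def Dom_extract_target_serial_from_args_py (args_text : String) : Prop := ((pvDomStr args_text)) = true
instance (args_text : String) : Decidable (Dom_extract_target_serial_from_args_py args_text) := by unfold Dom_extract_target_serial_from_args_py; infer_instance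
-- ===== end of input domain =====

-- B replaces A's tokenize-and-scan loop by one regex search
-- r'(?i)(?:^|\s)--wmi-target-serial\s+(\S+)' (objective: idiomatic; same asymptotic cost).

-- ===== PORT A =====
-- A's loop 'for i, p in enumerate(parts): if p.strip().lower() == flag and i+1 < len(parts): return parts[i+1]...'
-- ported as structural recursion over the enumerate list, carrying parts for the indexed lookup.
-- parts[i+1] is guarded by i+1 < len(parts) in A, so it never raises; pyGetD with default "" is exact here.
def pvALoop (parts : List String) : List (Int × String) → String
  | [] => ""
  | (i, p) :: rest =>
      if PySem.Str.lower (PySem.Str.strip p) = "--wmi-target-serial" ∧ i + 1 < (parts.length : Int) then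
        PySem.Str.upper (PySem.Str.stripChars (PySem.Str.strip (PySem.List.pyGetD parts (i + 1) "")) "\"'")
      else pvALoop parts rest

-- 'str(args_text or "")' is args_text itself for a str argument ('' or '' == '').
def extract_target_serial_from_args_py (args_text : String) : String :=
  let raw := PySem.Str.strip args_text
  if raw = "" then ""
  else
    let parts := PySem.Str.split₀ (PySem.Str.replace (PySem.Str.replace raw "\r" " ") "\n" " ")
    pvALoop parts (PySem.List.enumerate parts)

-- ===== PORT B =====
-- B is one regex search: re.search(r'(?i)(?:^|\s)--wmi-target-serial\s+(\S+)', s).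
-- Lean has no regex engine, so the search for THIS fixed pattern is ported by hand, step for step,
-- as re performs it: scan candidate start positions left to right; a position is eligible when it is
-- the string start or preceded by a whitespace char ((?:^|\s)); there, match the literal flag
-- case-insensitively ((?i)), then at least one whitespace (\s+, greedy), then capture the maximal
-- nonempty run of non-whitespace chars (\S+). Exact on the stated ASCII domain (Python's \s and
-- case folding agree with PySem.Chars.isspace/lowerChar there).
def pvFlag : List Char := ['-', '-', 'w', 'm', 'i', '-', 't', 'a', 'r', 'g', 'e', 't', '-', 's', 'e', 'r', 'i', 'a', 'l']

-- case-insensitive literal match of the pattern chars, returning the rest of the string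
def pvCIStrip : List Char → List Char → Option (List Char)
  | [], s => some s
  | _ :: _, [] => none
  | p :: ps, c :: cs => if PySem.Chars.lowerChar c = p then pvCIStrip ps cs else none

-- attempt the pattern body (flag, \s+, capture \S+) at this start position
def pvTryAt (s : List Char) : Option (List Char) :=
  match pvCIStrip pvFlag s with
  | none => none
  | some rest =>
    match rest with
    | [] => none
    | c :: _ =>
      if PySem.Chars.isspace c then
        match (rest.dropWhile PySem.Chars.isspace).takeWhile (fun d => !PySem.Chars.isspace d) with
        | [] => none
        | v => some v
      else none

-- re.search: leftmost eligible position wins; 'boundary' records '^ or previous char was \s'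
def pvRSearch : List Char → Bool → Option (List Char)
  | [], _ => none
  | c :: t, boundary =>
      match (if boundary then pvTryAt (c :: t) else none) with
      | some v => some v
      | none => pvRSearch t (PySem.Chars.isspace c)

-- m.group(1).strip("\"'").upper() if m else ""
def pvRender : Option (List Char) → String
  | some v => PySem.Str.upper (PySem.Str.stripChars (String.ofList v) "\"'")
  | none => ""

def extract_target_serial_from_args_py_alt (args_text : String) : String :=
  pvRender (pvRSearch args_text.toList true)

-- ===== PRECONDITION & SPEC =====
def Spec_extract_target_serial_from_args_py (args_text : String) (out : String) : Prop := out = extract_target_serial_from_args_py_alt args_text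
instance (args_text : String) (out : String) : Decidable (Spec_extract_target_serial_from_args_py args_text out) := by unfold Spec_extract_target_serial_from_args_py; infer_instance

-- ===== CLAIM (what is proved, stated in full; the proofs are below) =====
def Claim_equal_extract_target_serial_from_args_py : Prop := ∀ (args_text : String), Dom_extract_target_serial_from_args_py args_text → Spec_extract_target_serial_from_args_py args_text (extract_target_serial_from_args_py args_text)

-- ===== LEMMAS AND PROOFS =====

-- A simple structural description of Python's whitespace split (no accumulators).
def pvWords : List Char → List (List Char)
  | [] => []
  | c :: t =>
      if PySem.Chars.isspace c then pvWords t
      else (c :: t.takeWhile (fun d => !PySem.Chars.isspace d)) ::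
            pvWords (t.dropWhile (fun d => !PySem.Chars.isspace d))
  termination_by s => s.length
  decreasing_by
    · simp
    · simpa using Nat.lt_succ_of_le (List.length_dropWhile_le _ _)

-- token-level reading of the regex search: first adjacent word pair whose first word folds to the flag
def pvTokFind : List (List Char) → Option (List Char)
  | f :: v :: rest =>
      if f.map PySem.Chars.lowerChar = pvFlag then some v else pvTokFind (v :: rest)
  | _ => none

lemma pv_go_spec (s : List Char) : ∀ cur acc,
    PySem.Chars.split₀.go s cur acc =
      acc.reverse ++ (if cur.isEmpty then pvWords s
        else (cur.reverse ++ s.takeWhile (fun d => !PySem.Chars.isspace d)) ::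
              pvWords (s.dropWhile (fun d => !PySem.Chars.isspace d))) := by
  induction s with
  | nil =>
    intro cur acc
    cases cur <;> simp [PySem.Chars.split₀.go, pvWords.eq_1]
  | cons c t ih =>
    intro cur acc
    by_cases hc : PySem.Chars.isspace c
    · cases cur with
      | nil => simp [PySem.Chars.split₀.go, hc, ih, pvWords.eq_2]
      | cons x xs =>
        simp [PySem.Chars.split₀.go, hc, ih]
        conv_rhs => rw [pvWords.eq_2]
        simp [hc]
    · cases cur with
      | nil =>
        simp [PySem.Chars.split₀.go, hc, ih]
        conv_rhs => rw [pvWords.eq_2]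
        simp [hc]
      | cons x xs => simp [PySem.Chars.split₀.go, hc, ih]

lemma pv_split₀_eq_words (s : List Char) : PySem.Chars.split₀ s = pvWords s := by
  simp [PySem.Chars.split₀, pv_go_spec]

lemma pv_words_all_space (v : List Char) (hv : ∀ c ∈ v, PySem.Chars.isspace c) : pvWords v = [] := by
  induction v with
  | nil => simp [pvWords.eq_1]
  | cons c t ih =>
    simp [pvWords.eq_2, hv c (by simp)]
    exact ih fun x hx => hv x (by simp [hx])

lemma pv_words_append_spaces (v : List Char) (hv : ∀ c ∈ v, PySem.Chars.isspace c) :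
    ∀ u, pvWords (u ++ v) = pvWords u := by
  intro u
  induction u using pvWords.induct with
  | case1 =>
    simp [pv_words_all_space v hv, pvWords.eq_1]
  | case2 c t hc ih =>
    simp [pvWords.eq_2, hc, ih]
  | case3 c t hc ih =>
    rw [List.cons_append, pvWords.eq_2, pvWords.eq_2]
    simp only [hc, if_false, Bool.false_eq_true]
    have htv : List.takeWhile (fun d => !PySem.Chars.isspace d) v = [] := by
      rw [List.takeWhile_eq_nil_iff]
      intro hl
      have h0 := hv v[0] (List.getElem_mem hl)
      simp [h0]
    have hdv : List.dropWhile (fun d => !PySem.Chars.isspace d) v = v := by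
      rw [List.dropWhile_eq_self_iff]
      intro hl
      have h0 := hv v[0] (List.getElem_mem hl)
      simp [h0]
    by_cases ht : t.all (fun d => !PySem.Chars.isspace d)
    · have htake : List.takeWhile (fun d => !PySem.Chars.isspace d) t = t :=
        List.takeWhile_eq_self_iff.mpr (by simpa [List.all_eq_true] using ht)
      have hdrop : List.dropWhile (fun d => !PySem.Chars.isspace d) t = [] :=
        List.dropWhile_eq_nil_iff.mpr (by simpa [List.all_eq_true] using ht)
      rw [List.takeWhile_append, List.dropWhile_append]
      simp [htake, hdrop, htv, hdv, pv_words_all_space v hv, pvWords.eq_1]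
    · have htake : ¬ (List.takeWhile (fun d => !PySem.Chars.isspace d) t).length = t.length := by
        intro hlen
        exact ht (by
          simpa [List.all_eq_true] using List.takeWhile_eq_self_iff.mp
            ((List.takeWhile_prefix _).eq_of_length hlen))
      have hdrop : ¬ (List.dropWhile (fun d => !PySem.Chars.isspace d) t).isEmpty = true := by
        simp only [List.isEmpty_iff]
        intro hnil
        exact ht (by simpa [List.all_eq_true] using List.dropWhile_eq_nil_iff.mp hnil)
      rw [List.takeWhile_append, List.dropWhile_append]
      simp [htake, hdrop, ih]

lemma pv_words_lstrip (s : List Char) : pvWords (PySem.Chars.lstrip s) = pvWords s := by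
  induction s with
  | nil => rfl
  | cons c t ih =>
    by_cases hc : PySem.Chars.isspace c
    · simpa [PySem.Chars.lstrip, hc, pvWords] using ih
    · simp [PySem.Chars.lstrip, hc]

lemma pv_words_strip (s : List Char) : pvWords (PySem.Chars.strip s) = pvWords s := by
  have hr : ∀ x : List Char, pvWords (PySem.Chars.rstrip x) = pvWords x := by
    intro x
    have hx : x = (List.dropWhile PySem.Chars.isspace x.reverse).reverse ++
        (List.takeWhile PySem.Chars.isspace x.reverse).reverse := by
      have h := List.takeWhile_append_dropWhile (p := PySem.Chars.isspace) (l := x.reverse)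
      rw [← List.reverse_append, h, List.reverse_reverse]
    conv_rhs => rw [hx]
    rw [pv_words_append_spaces _ (fun c hc =>
      List.mem_takeWhile_imp (by simpa using hc)) _]
    simp [PySem.Chars.rstrip]
  rw [PySem.Chars.strip, hr, pv_words_lstrip]

lemma pv_words_map (f : Char → Char)
    (hsp : ∀ c, PySem.Chars.isspace (f c) = PySem.Chars.isspace c)
    (hid : ∀ c, ¬ PySem.Chars.isspace c → f c = c) :
    ∀ s, pvWords (s.map f) = pvWords s := by
  intro s
  induction s using pvWords.induct with
  | case1 => simp
  | case2 c t hc ih => simp [pvWords.eq_2, hsp c, hc, ih]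
  | case3 c t hc ih =>
    have hcb : PySem.Chars.isspace c = false := by simpa using hc
    have hfc : f c = c := hid c (by simp [hcb])
    have h1 : List.takeWhile (fun d => !PySem.Chars.isspace d) (t.map f) =
        List.takeWhile (fun d => !PySem.Chars.isspace d) t := by
      rw [List.takeWhile_map]
      rw [show ((fun d => !PySem.Chars.isspace d) ∘ f) = (fun d => !PySem.Chars.isspace d) from
        funext fun d => by simp [hsp d]]
      have hfx : ∀ x ∈ List.takeWhile (fun d => !PySem.Chars.isspace d) t, f x = x := by
        intro x hx
        have hx' := List.mem_takeWhile_imp hx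
        simp only [Bool.not_eq_eq_eq_not, Bool.not_true] at hx'
        exact hid x (by simp [hx'])
      calc List.map f (List.takeWhile (fun d => !PySem.Chars.isspace d) t)
          = List.map id (List.takeWhile (fun d => !PySem.Chars.isspace d) t) :=
            List.map_congr_left hfx
        _ = _ := List.map_id _
    have h2 : List.dropWhile (fun d => !PySem.Chars.isspace d) (t.map f) =
        (List.dropWhile (fun d => !PySem.Chars.isspace d) t).map f := by
      rw [List.dropWhile_map]
      rw [show ((fun d => !PySem.Chars.isspace d) ∘ f) = (fun d => !PySem.Chars.isspace d) from
        funext fun d => by simp [hsp d]]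
    rw [List.map_cons, pvWords.eq_2, pvWords.eq_2, hfc]
    simp only [hcb, Bool.false_eq_true, if_false, h1, h2, ih]

lemma pv_replace_single (a b : Char) (s : List Char) :
    PySem.Chars.replace s [a] [b] = s.map (fun c => if c = a then b else c) := by
  have hgo : ∀ (fuel : Nat) (l acc : List Char), l.length ≤ fuel →
      PySem.Chars.replace.go [a] [b] fuel l acc =
        acc.reverse ++ l.map (fun c => if c = a then b else c) := by
    intro fuel
    induction fuel with
    | zero =>
      intro l acc h
      have hl : l = [] := List.eq_nil_of_length_eq_zero (Nat.le_zero.mp h)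
      subst hl
      simp [PySem.Chars.replace.go]
    | succ n ih =>
      intro l acc h
      cases l with
      | nil => simp [PySem.Chars.replace.go]
      | cons c t =>
        by_cases hca : c = a
        · subst hca
          simp [PySem.Chars.replace.go, List.isPrefixOf, ih t _ (by simpa using h)]
        · simp [PySem.Chars.replace.go, List.isPrefixOf, Ne.symm hca, hca,
            ih t _ (by simpa using Nat.le_of_succ_le_succ h)]
  simp [PySem.Chars.replace, hgo s.length s [] le_rfl]

lemma pv_words_nonspace (s : List Char) :
    ∀ w ∈ pvWords s, ∀ c ∈ w, ¬ PySem.Chars.isspace c := by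
  induction s using pvWords.induct with
  | case1 => simp [pvWords.eq_1]
  | case2 c t hc ih => simpa [pvWords.eq_2, hc] using ih
  | case3 c t hc ih =>
    rw [pvWords.eq_2]
    simp only [hc, if_false, Bool.false_eq_true]
    intro w hw
    rcases List.mem_cons.mp hw with rfl | hw'
    · intro x hx
      rcases List.mem_cons.mp hx with rfl | hx'
      · exact hc
      · have := List.mem_takeWhile_imp hx'
        simp only [Bool.not_eq_eq_eq_not, Bool.not_true] at this
        simp [this]
    · exact ih w hw'

lemma pv_strip_token (w : List Char) (hw : ∀ c ∈ w, ¬ PySem.Chars.isspace c) :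
    PySem.Chars.strip w = w := by
  have h1 : List.dropWhile PySem.Chars.isspace w = w :=
    List.dropWhile_eq_self_iff.mpr fun hl => by simpa using hw w[0] (List.getElem_mem hl)
  have h2 : List.dropWhile PySem.Chars.isspace w.reverse = w.reverse :=
    List.dropWhile_eq_self_iff.mpr fun hl => by
      simpa using hw _ (List.mem_reverse.mp (List.getElem_mem hl))
  simp [PySem.Chars.strip, PySem.Chars.lstrip, PySem.Chars.rstrip, h1, h2]

-- A's indexed token scan computes the token-level search pvTokFind
lemma pv_loop_eq (suf pre : List String)
    (hs : ∀ p ∈ pre ++ suf, PySem.Str.strip p = p) :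
    pvALoop (pre ++ suf) (PySem.List.enumerate suf (pre.length : Int)) =
      pvRender (pvTokFind (suf.map String.toList)) := by
  induction suf generalizing pre with
  | nil => simp [PySem.List.enumerate, pvALoop, pvTokFind, pvRender]
  | cons p rest ih =>
    have hp : PySem.Str.strip p = p := hs p (by simp)
    rw [show PySem.List.enumerate (p :: rest) (pre.length : Int) =
        ((pre.length : Int), p) :: PySem.List.enumerate rest ((pre.length : Int) + 1) from by
      simp [PySem.List.enumerate]]
    have hcond : (PySem.Str.lower p = "--wmi-target-serial") ↔
        (p.toList.map PySem.Chars.lowerChar = pvFlag) := by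
      constructor
      · intro h
        have := congrArg String.toList h
        simpa [PySem.Str.toList_lower, PySem.Chars.lower, pvFlag] using this
      · intro h
        have h2 : (PySem.Str.lower p).toList = ("--wmi-target-serial" : String).toList := by
          simpa [PySem.Str.toList_lower, PySem.Chars.lower, pvFlag] using h
        calc PySem.Str.lower p = String.ofList (PySem.Str.lower p).toList := by
              rw [show PySem.Str.lower p = String.ofList (PySem.Chars.lower p.toList) from rfl]
              simp
          _ = "--wmi-target-serial" := by rw [h2]; simp
    cases rest with
    | nil =>
      simp [pvALoop, hp, pvTokFind, pvRender, PySem.List.enumerate]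
    | cons q r =>
      by_cases hflag : p.toList.map PySem.Chars.lowerChar = pvFlag
      · have hq : PySem.List.pyGetD (pre ++ p :: q :: r) ((pre.length : Int) + 1) "" = q := by
          rw [show ((pre.length : Int) + 1) = ((pre.length + 1 : Nat) : Int) from by push_cast; ring,
            PySem.List.pyGetD_natCast, List.getD_eq_getElem?_getD,
            List.getElem?_append_right (by omega)]
          simp
        simp [pvALoop, hp, hcond.mpr hflag, hq, hs q (by simp), pvTokFind, hflag, pvRender]
      · have harr : pre ++ p :: q :: r = (pre ++ [p]) ++ q :: r := by simp
        have hstep : pvALoop (pre ++ p :: q :: r)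
            (PySem.List.enumerate (q :: r) ((pre.length : Int) + 1)) =
            pvRender (pvTokFind ((q :: r).map String.toList)) := by
          rw [harr, show ((pre.length : Int) + 1) = (((pre ++ [p]).length : Nat) : Int) from by
            simp]
          exact ih (pre ++ [p]) (fun x hx => hs x (by simpa [List.append_assoc] using hx))
        conv_lhs => rw [pvALoop]
        rw [if_neg (by rw [hp]; simp [hcond, hflag]), hstep]
        conv_rhs => rw [List.map_cons, List.map_cons, pvTokFind]
        rw [if_neg hflag]
        simp

-- B-side facts: the char-level regex scan computes the same token-level search

lemma pv_lowerChar_of_space (c : Char) (h : PySem.Chars.isspace c = true) :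
    PySem.Chars.lowerChar c = c := by
  have hup : PySem.Chars.isupper c = false := by
    simp only [PySem.Chars.isspace, PySem.Chars.isupper, Char.toNat] at *
    simp only [Bool.and_eq_false_iff, decide_eq_false_iff_not, Char.le_def,
      UInt32.le_iff_toNat_le]
    revert h
    simp only [Bool.or_eq_true, Bool.and_eq_true, decide_eq_true_eq]
    have hA : ('A' : Char).val.toNat = 65 := by decide
    have hZ : ('Z' : Char).val.toNat = 90 := by decide
    omega
  simp [PySem.Chars.lowerChar, hup]

lemma pv_flag_nonspace : ∀ y ∈ pvFlag, PySem.Chars.isspace y = false := by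
  intro y hy
  fin_cases hy <;> rfl

lemma pv_ciStrip_of_map (ps pre rest : List Char)
    (h : pre.map PySem.Chars.lowerChar = ps) : pvCIStrip ps (pre ++ rest) = some rest := by
  induction pre generalizing ps with
  | nil => subst h; simp [pvCIStrip]
  | cons c cs ih =>
    subst h
    simp [pvCIStrip, ih]

lemma pv_ciStrip_some (ps : List Char) : ∀ cs rest, pvCIStrip ps cs = some rest →
    ∃ pre, cs = pre ++ rest ∧ pre.map PySem.Chars.lowerChar = ps := by
  induction ps with
  | nil =>
    intro cs rest h
    simp [pvCIStrip] at h
    exact ⟨[], by simp [h]⟩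
  | cons p ps ih =>
    intro cs rest h
    cases cs with
    | nil => simp [pvCIStrip] at h
    | cons c cs' =>
      by_cases hc : PySem.Chars.lowerChar c = p
      · simp only [pvCIStrip, hc, if_true] at h
        obtain ⟨pre, hpre, hmap⟩ := ih cs' rest h
        exact ⟨c :: pre, by simp [hpre], by simp [hmap, hc]⟩
      · simp [pvCIStrip, hc] at h

lemma pv_tryAt_space (c : Char) (t : List Char) (h : PySem.Chars.isspace c = true) :
    pvTryAt (c :: t) = none := by
  have hne : PySem.Chars.lowerChar c ≠ '-' := by
    rw [pv_lowerChar_of_space c h]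
    intro hc
    subst hc
    simp [PySem.Chars.isspace, Char.toNat] at h
  simp [pvTryAt, pvFlag, pvCIStrip, hne]

lemma pv_rsearch_space (c : Char) (t : List Char) (h : PySem.Chars.isspace c = true) :
    pvRSearch (c :: t) true = pvRSearch t true := by
  simp [pvRSearch, pv_tryAt_space c t h, h]

lemma pv_rsearch_false (s : List Char) :
    pvRSearch s false = pvRSearch (s.dropWhile (fun d => !PySem.Chars.isspace d)) true := by
  induction s with
  | nil => simp [pvRSearch]
  | cons c t ih =>
    by_cases hc : PySem.Chars.isspace c
    · rw [show pvRSearch (c :: t) false = pvRSearch t (PySem.Chars.isspace c) from by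
        simp [pvRSearch]]
      rw [hc, List.dropWhile_cons]
      simp only [hc, Bool.not_true, Bool.false_eq_true, if_false]
      exact (pv_rsearch_space c t hc).symm
    · have hcb : PySem.Chars.isspace c = false := by simpa using hc
      rw [show pvRSearch (c :: t) false = pvRSearch t (PySem.Chars.isspace c) from by
        simp [pvRSearch]]
      rw [hcb, List.dropWhile_cons]
      simp only [hcb, Bool.not_false, if_true]
      exact ih

lemma pv_dropWhile_head_fails {p : Char → Bool} {s : List Char} {c : Char} {t : List Char}
    (h : s.dropWhile p = c :: t) : p c = false := by
  have := List.head?_dropWhile_not p s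
  rw [h] at this
  simpa using this

lemma pv_tryAt_match (c : Char) (t : List Char)
    (hm : (c :: t.takeWhile (fun d => !PySem.Chars.isspace d)).map PySem.Chars.lowerChar = pvFlag) :
    pvTryAt (c :: t) =
      (pvWords (t.dropWhile (fun d => !PySem.Chars.isspace d))).head? := by
  have hsplit : c :: t = (c :: t.takeWhile (fun d => !PySem.Chars.isspace d)) ++
      t.dropWhile (fun d => !PySem.Chars.isspace d) := by
    simp [List.takeWhile_append_dropWhile]
  rw [pvTryAt, hsplit, pv_ciStrip_of_map pvFlag _ _ hm]
  cases hd : t.dropWhile (fun d => !PySem.Chars.isspace d) with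
  | nil => simp [pvWords.eq_1]
  | cons d r =>
    have hds : PySem.Chars.isspace d = true := by
      have := pv_dropWhile_head_fails hd
      simpa using this
    simp only [hds, if_true]
    cases he : (d :: r).dropWhile PySem.Chars.isspace with
    | nil =>
      have hw : pvWords (d :: r) = pvWords ([] : List Char) := by
        have := pv_words_lstrip (d :: r)
        rw [show PySem.Chars.lstrip (d :: r) = (d :: r).dropWhile PySem.Chars.isspace from rfl,
          he] at this
        exact this.symm
      rw [hw, pvWords.eq_1]
      simp
    | cons e u =>
      have hes : PySem.Chars.isspace e = false := pv_dropWhile_head_fails he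
      have hw : pvWords (d :: r) = pvWords (e :: u) := by
        have := pv_words_lstrip (d :: r)
        rw [show PySem.Chars.lstrip (d :: r) = (d :: r).dropWhile PySem.Chars.isspace from rfl,
          he] at this
        exact this.symm
      rw [hw, pvWords.eq_2]
      simp [hes]

lemma pv_tryAt_nomatch (c : Char) (t : List Char)
    (hm : (c :: t.takeWhile (fun d => !PySem.Chars.isspace d)).map PySem.Chars.lowerChar ≠ pvFlag) :
    pvTryAt (c :: t) = none := by
  rw [pvTryAt]
  cases hstrip : pvCIStrip pvFlag (c :: t) with
  | none => rfl
  | some rest =>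
    obtain ⟨pre, hpre, hmap⟩ := pv_ciStrip_some pvFlag (c :: t) rest hstrip
    have hprens : ∀ x ∈ pre, PySem.Chars.isspace x = false := by
      intro x hx
      by_contra hxs
      have hxs' : PySem.Chars.isspace x = true := by simpa using hxs
      have hmem : PySem.Chars.lowerChar x ∈ pvFlag := by
        rw [← hmap]; exact List.mem_map_of_mem hx
      rw [pv_lowerChar_of_space x hxs'] at hmem
      have := pv_flag_nonspace x hmem
      rw [this] at hxs'
      exact absurd hxs' (by simp)
    cases rest with
    | nil => rfl
    | cons d r =>
      by_cases hds : PySem.Chars.isspace d = true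
      · exfalso
        -- pre must be exactly the first token c :: takeWhile, contradicting hm
        cases pre with
        | nil => simp [pvFlag] at hmap
        | cons c0 pre1 =>
          have hc0 : c0 = c := by
            have := hpre
            simp at this
            exact this.1.symm
          have ht : t = pre1 ++ d :: r := by
            have := hpre
            simp [hc0] at this
            exact this
          have htake : t.takeWhile (fun x => !PySem.Chars.isspace x) = pre1 := by
            rw [ht, List.takeWhile_append]
            have h1 : List.takeWhile (fun x => !PySem.Chars.isspace x) pre1 = pre1 :=
              List.takeWhile_eq_self_iff.mpr (by
                intro x hx
                have := hprens x (List.mem_cons_of_mem _ hx)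
                simp [this])
            simp [h1, hds]
          rw [htake] at hm
          rw [hc0] at hmap
          exact hm hmap
      · simp [hds]

lemma pv_search_eq (s : List Char) : pvRSearch s true = pvTokFind (pvWords s) := by
  induction s using pvWords.induct with
  | case1 => simp [pvRSearch, pvWords.eq_1, pvTokFind]
  | case2 c t hc ih =>
    rw [pvWords.eq_2]
    simp only [hc, if_true]
    rw [pv_rsearch_space c t hc, ih]
  | case3 c t hc ih =>
    have hcb : PySem.Chars.isspace c = false := by simpa using hc
    rw [pvWords.eq_2]
    simp only [hcb, Bool.false_eq_true, if_false]
    have hfall : pvRSearch t false =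
        pvTokFind (pvWords (t.dropWhile (fun d => !PySem.Chars.isspace d))) := by
      rw [pv_rsearch_false t, ih]
    by_cases hm : (c :: t.takeWhile (fun d => !PySem.Chars.isspace d)).map PySem.Chars.lowerChar
        = pvFlag
    · rw [show pvRSearch (c :: t) true =
          (match pvTryAt (c :: t) with
            | some v => some v
            | none => pvRSearch t (PySem.Chars.isspace c)) from rfl]
      rw [pv_tryAt_match c t hm, hcb]
      cases hw : pvWords (t.dropWhile (fun d => !PySem.Chars.isspace d)) with
      | nil =>
        simp only [List.head?_nil]
        rw [hfall, hw]
        simp [pvTokFind]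
      | cons w ws =>
        simp [pvTokFind, hm]
    · rw [show pvRSearch (c :: t) true =
          (match pvTryAt (c :: t) with
            | some v => some v
            | none => pvRSearch t (PySem.Chars.isspace c)) from rfl]
      rw [pv_tryAt_nomatch c t hm, hcb]
      rw [hfall]
      cases hw : pvWords (t.dropWhile (fun d => !PySem.Chars.isspace d)) with
      | nil => simp [pvTokFind]
      | cons w ws =>
        conv_rhs => rw [pvTokFind]
        rw [if_neg hm]

-- ===== VERDICT (by name: the statement is the Claim_ definition above) =====
theorem extract_target_serial_from_args_py_spec : Claim_equal_extract_target_serial_from_args_py := by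
  intro args _hdom
  unfold Spec_extract_target_serial_from_args_py
  simp only [extract_target_serial_from_args_py, extract_target_serial_from_args_py_alt]
  have hid1 : ∀ c : Char, ¬ PySem.Chars.isspace c →
      (fun c => if c = '\r' then ' ' else c) c = c := by
    intro c hc
    by_cases h : c = '\r'
    · exact absurd (by simp [h, PySem.Chars.isspace]) hc
    · simp [h]
  have hid2 : ∀ c : Char, ¬ PySem.Chars.isspace c →
      (fun c => if c = '\n' then ' ' else c) c = c := by
    intro c hc
    by_cases h : c = '\n'
    · exact absurd (by simp [h, PySem.Chars.isspace]) hc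
    · simp [h]
  have hf1 : ∀ c : Char, PySem.Chars.isspace ((fun c => if c = '\r' then ' ' else c) c) =
      PySem.Chars.isspace c := by
    intro c
    by_cases h : c = '\r'
    · simp [h, PySem.Chars.isspace]
    · simp [h]
  have hf2 : ∀ c : Char, PySem.Chars.isspace ((fun c => if c = '\n' then ' ' else c) c) =
      PySem.Chars.isspace c := by
    intro c
    by_cases h : c = '\n'
    · simp [h, PySem.Chars.isspace]
    · simp [h]
  have hparts : PySem.Str.split₀
      (PySem.Str.replace (PySem.Str.replace (PySem.Str.strip args) "\r" " ") "\n" " ") =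
      PySem.Str.split₀ args := by
    simp only [PySem.Str.split₀]
    refine congrArg (List.map String.ofList) ?_
    rw [pv_split₀_eq_words, pv_split₀_eq_words]
    rw [show (PySem.Str.replace (PySem.Str.replace (PySem.Str.strip args) "\r" " ") "\n" " ").toList
        = PySem.Chars.replace (PySem.Chars.replace (PySem.Chars.strip args.toList)
            ['\r'] [' ']) ['\n'] [' '] from by
      rw [PySem.Str.toList_replace, PySem.Str.toList_replace, PySem.Str.toList_strip]
      rfl]
    rw [pv_replace_single, pv_replace_single,
      pv_words_map _ hf2 hid2, pv_words_map _ hf1 hid1, pv_words_strip]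
  have hBtok : pvRender (pvRSearch args.toList true) =
      pvRender (pvTokFind (pvWords args.toList)) := by
    rw [pv_search_eq]
  by_cases hraw : PySem.Str.strip args = ""
  · rw [if_pos hraw]
    have hstripnil : PySem.Chars.strip args.toList = [] := by
      have h := congrArg String.toList hraw
      rw [PySem.Str.toList_strip] at h
      simpa using h
    have hw : pvWords args.toList = [] := by
      rw [← pv_words_strip, hstripnil, pvWords.eq_1]
    rw [hBtok, hw]
    simp [pvTokFind, pvRender]
  · rw [if_neg hraw, hparts, hBtok]
    have hs : ∀ p ∈ PySem.Str.split₀ args, PySem.Str.strip p = p := by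
      intro p hp
      simp only [PySem.Str.split₀, List.mem_map] at hp
      obtain ⟨w, hw, rfl⟩ := hp
      rw [pv_split₀_eq_words] at hw
      have hns := pv_words_nonspace args.toList w hw
      simp [PySem.Str.strip, String.toList_ofList, pv_strip_token w hns]
    have hmain := pv_loop_eq (PySem.Str.split₀ args) [] (by simpa using hs)
    simp only [List.nil_append, List.length_nil, Nat.cast_zero] at hmain
    rw [hmain]
    have hlist : (PySem.Str.split₀ args).map String.toList = pvWords args.toList := by
      rw [PySem.Str.split₀, pv_split₀_eq_words, List.map_map]
      rw [show String.toList ∘ String.ofList = id from funext fun w => by simp]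
      simp
    rw [hlist]
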